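-- pv_equiv track=rewrite | github.com/maksonlee/multitest_transport | multitest_transport/test_scheduler/tfc_event_handler.py | _FindFailedTestCountThreshold
-- ===== SOURCE A (Python) =====
-- FAILED_TEST_COUNT_THRESHOLDS = [1, 10, 50, 100, 200, 500, 1000]
--
-- def _FindFailedTestCountThreshold(failed_test_count, prev_failed_test_count):
--   """Returns the minimum threshold between two counts."""
--   if failed_test_count is None:
--     return None
--   if prev_failed_test_count is None:
--     prev_failed_test_count = float('inf')
--   for threshold in FAILED_TEST_COUNT_THRESHOLDS:
--     if failed_test_count < threshold <= prev_failed_test_count: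
--       return threshold
--   return None
-- ===== SOURCE B (Python) =====
-- import bisect
--
-- FAILED_TEST_COUNT_THRESHOLDS = [1, 10, 50, 100, 200, 500, 1000]
--
-- def _FindFailedTestCountThreshold(failed_test_count, prev_failed_test_count):
--   """Returns the minimum threshold between two counts."""
--   if failed_test_count is None:
--     return None
--   # index of the first threshold strictly greater than failed_test_count
--   i = bisect.bisect_right(FAILED_TEST_COUNT_THRESHOLDS, failed_test_count)
--   if i == len(FAILED_TEST_COUNT_THRESHOLDS):
--     return None
--   threshold = FAILED_TEST_COUNT_THRESHOLDS[i]
--   if prev_failed_test_count is not None and threshold > prev_failed_test_count: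
--     return None
--   return threshold
-- ===== Notes on version B (the rewrite author's own statement) =====
-- stated objective: idiomatic
-- what changed: Replaces the linear scan over the sorted thresholds with a single bisect_right lookup of the first threshold above failed_test_count, followed by one comparison against prev_failed_test_count.
import Mathlib
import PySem

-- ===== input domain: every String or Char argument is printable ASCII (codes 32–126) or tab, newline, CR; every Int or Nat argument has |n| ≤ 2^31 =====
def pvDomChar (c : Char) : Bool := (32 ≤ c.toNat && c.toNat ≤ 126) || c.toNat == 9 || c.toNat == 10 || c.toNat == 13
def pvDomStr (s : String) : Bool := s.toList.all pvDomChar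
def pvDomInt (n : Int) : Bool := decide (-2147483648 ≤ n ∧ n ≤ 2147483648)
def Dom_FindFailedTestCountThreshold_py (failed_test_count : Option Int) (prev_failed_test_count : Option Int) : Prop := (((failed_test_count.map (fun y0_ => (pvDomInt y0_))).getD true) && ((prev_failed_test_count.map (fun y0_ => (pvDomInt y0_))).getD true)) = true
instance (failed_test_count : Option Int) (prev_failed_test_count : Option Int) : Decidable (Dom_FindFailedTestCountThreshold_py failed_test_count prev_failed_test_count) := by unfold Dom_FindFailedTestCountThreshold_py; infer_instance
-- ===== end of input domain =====

-- ===== PORT A =====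
-- B replaces A's linear scan with a bisect_right index lookup (idiomatic; same result).
def pyThresholds : List Int := [1, 10, 50, 100, 200, 500, 1000]

-- A's for-loop: first threshold with failed_test_count < threshold <= prev (prev = none means float('inf'),
-- which is exact here since float('inf') compares greater than every threshold).
def pyLoopA (f : Int) (prev : Option Int) : List Int → Option Int
  | [] => none
  | t :: rest =>
    if f < t ∧ (match prev with | none => true | some p => decide (t ≤ p)) = true then some t
    else pyLoopA f prev rest

def FindFailedTestCountThreshold_py (failed_test_count : Option Int) (prev_failed_test_count : Option Int) : Option Int :=
  match failed_test_count with
  | none => none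
  | some f => pyLoopA f prev_failed_test_count pyThresholds

-- ===== PORT B =====
-- bisect.bisect_right on the sorted thresholds = index of the first element strictly greater
-- than f; ported as the corresponding Lean function List.findIdx (which is length when absent,
-- matching bisect_right's len(list) result on a sorted list).
def FindFailedTestCountThreshold_py_alt (failed_test_count : Option Int) (prev_failed_test_count : Option Int) : Option Int :=
  match failed_test_count with
  | none => none
  | some f =>
    let i := pyThresholds.findIdx (fun t => decide (f < t))
    if i = pyThresholds.length then none
    else
      let threshold := pyThresholds[i]!
      match prev_failed_test_count with
      | some p => if p < threshold then none else some threshold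
      | none => some threshold

-- ===== PRECONDITION & SPEC =====
def Spec_FindFailedTestCountThreshold_py (failed_test_count : Option Int) (prev_failed_test_count : Option Int) (out : Option Int) : Prop := out = FindFailedTestCountThreshold_py_alt failed_test_count prev_failed_test_count
instance (failed_test_count : Option Int) (prev_failed_test_count : Option Int) (out : Option Int) : Decidable (Spec_FindFailedTestCountThreshold_py failed_test_count prev_failed_test_count out) := by unfold Spec_FindFailedTestCountThreshold_py; infer_instance

-- ===== CLAIM (what is proved, stated in full; the proofs are below) =====
def Claim_equal_FindFailedTestCountThreshold_py : Prop := ∀ (failed_test_count : Option Int) (prev_failed_test_count : Option Int), Dom_FindFailedTestCountThreshold_py failed_test_count prev_failed_test_count → Spec_FindFailedTestCountThreshold_py failed_test_count prev_failed_test_count (FindFailedTestCountThreshold_py failed_test_count prev_failed_test_count)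

-- ===== LEMMAS AND PROOFS =====

-- If every element exceeds p, A's loop rejects everything.
theorem pyLoopA_none_of_gt (f p : Int) (l : List Int) (h : ∀ t ∈ l, p < t) :
    pyLoopA f (some p) l = none := by
  induction l with
  | nil => rfl
  | cons a l ih =>
    simp only [pyLoopA]
    rw [if_neg]
    · exact ih (fun t ht => h t (List.mem_cons_of_mem a ht))
    · rintro ⟨_, hle⟩
      have := h a (List.mem_cons_self)
      simp only [decide_eq_true_eq] at hle
      omega

-- A's scan with prev = inf equals the findIdx lookup.
theorem pyLoopA_eq_findIdx_none (f : Int) (l : List Int) :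
    pyLoopA f none l =
      (let i := l.findIdx (fun t => decide (f < t));
       if i = l.length then none else some l[i]!) := by
  induction l with
  | nil => rfl
  | cons a l ih =>
    by_cases h : f < a
    · simp [pyLoopA, List.findIdx_cons, h]
    · simp only [pyLoopA, List.findIdx_cons, h, decide_false, cond_false]
      rw [if_neg (by simp : ¬(False ∧ True)), ih]
      simp only [List.length_cons, Nat.add_right_cancel_iff]
      by_cases hi : l.findIdx (fun t => decide (f < t)) = l.length
      · simp [hi]
      · simp [hi]

-- On a sorted list, A's scan with prev = some p equals the findIdx lookup guarded by p.
theorem pyLoopA_eq_findIdx_some (f p : Int) (l : List Int) (hs : l.Pairwise (· ≤ ·)) :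
    pyLoopA f (some p) l =
      (let i := l.findIdx (fun t => decide (f < t));
       if i = l.length then none else if p < l[i]! then none else some l[i]!) := by
  induction l with
  | nil => rfl
  | cons a l ih =>
    rcases List.pairwise_cons.mp hs with ⟨ha, hs'⟩
    by_cases h : f < a
    · by_cases h2 : a ≤ p
      · simp [pyLoopA, List.findIdx_cons, h, h2, not_lt.mpr h2]
      · have hp : p < a := not_le.mp h2
        simp only [pyLoopA, List.findIdx_cons, h, decide_true, cond_true]
        rw [if_neg (by simp [h2] : ¬(True ∧ decide (a ≤ p) = true))]
        rw [pyLoopA_none_of_gt f p l (fun t ht => lt_of_lt_of_le hp (ha t ht))]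
        simp [hp]
    · simp only [pyLoopA, List.findIdx_cons, h, decide_false, cond_false]
      rw [if_neg (by simp : ¬(False ∧ decide (a ≤ p) = true)), ih hs']
      simp only [List.length_cons, Nat.add_right_cancel_iff]
      by_cases hi : l.findIdx (fun t => decide (f < t)) = l.length
      · simp [hi]
      · simp [hi]

-- ===== VERDICT (by name: the statement is the Claim_ definition above) =====
theorem FindFailedTestCountThreshold_py_spec : Claim_equal_FindFailedTestCountThreshold_py := by
  intro fc pc _
  unfold Spec_FindFailedTestCountThreshold_py
  rcases fc with _ | f
  · rfl
  · rcases pc with _ | p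
    · simpa [FindFailedTestCountThreshold_py, FindFailedTestCountThreshold_py_alt] using
        pyLoopA_eq_findIdx_none f pyThresholds
    · simpa [FindFailedTestCountThreshold_py, FindFailedTestCountThreshold_py_alt] using
        pyLoopA_eq_findIdx_some f p pyThresholds (by decide)
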